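-- pv_equiv track=rewrite | github.com/osandov/project-euler | Problem46.py | twice_squares
-- ===== SOURCE A (Python) =====
-- def twice_squares(n):
--     l = [False] * n
--     i = 1
--     while True:
--         x = 2 * i * i
--         if x >= n:
--             return l
--         l[x] = True
--         i += 1
-- ===== SOURCE B (Python) =====
-- def twice_squares(n):
--     out = []
--     k = 1
--     for x in range(n):
--         hit = (x == 2 * k * k)
--         out.append(hit)
--         if hit:
--             k += 1
--     return out
-- ===== Notes on version B (the rewrite author's own statement) =====
-- stated objective: alternative
-- what changed: B replaces A's preallocate-then-mark sieve (jumping only to the marked indices in a preallocated mutable list) by a single forward scan that appends one Bool per index, advancing a next-candidate pointer when the current index equals twice the square of the pointer.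
import Mathlib
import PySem

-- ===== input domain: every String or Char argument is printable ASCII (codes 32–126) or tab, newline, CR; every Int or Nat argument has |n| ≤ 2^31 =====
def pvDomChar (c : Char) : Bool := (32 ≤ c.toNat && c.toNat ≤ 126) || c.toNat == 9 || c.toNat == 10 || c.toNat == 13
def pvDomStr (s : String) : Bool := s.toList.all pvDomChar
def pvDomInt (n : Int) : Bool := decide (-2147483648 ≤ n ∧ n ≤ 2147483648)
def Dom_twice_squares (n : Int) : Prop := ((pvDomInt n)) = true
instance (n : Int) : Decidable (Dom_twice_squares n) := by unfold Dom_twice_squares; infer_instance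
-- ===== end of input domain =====

-- B replaces A's preallocate-then-mark sieve by one forward scan with a next-candidate
-- pointer; objective: alternative decomposition (same asymptotic cost).

-- ===== PORT A =====
-- A's while-loop; Python's i is always ≥ 1 here, carried as a Nat with the same values.
-- l[x] = True is List.set: 2*i*i is in range whenever the branch is taken (2*i*i < n = len(l)).
def twiceLoopA (n : Int) (l : List Bool) (i : Nat) : List Bool :=
  if ((2 * i * i : Nat) : Int) ≥ n then l
  else twiceLoopA n (l.set (2 * i * i) true) (i + 1)
termination_by n.toNat - 2 * i * i
decreasing_by
  rename_i h
  rw [not_le] at h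
  have h1 : 2 * i * i < n.toNat := by omega
  have h2 : 2 * i * i < 2 * (i+1) * (i+1) := by nlinarith
  omega

def twice_squares (n : Int) : List Bool :=
  twiceLoopA n (List.replicate n.toNat false) 1

-- ===== PORT B =====
-- loop body of Source B's for-loop: append the hit flag, advance the pointer on a hit
def twiceStepB (st : List Bool × Int) (x : Int) : List Bool × Int :=
  let hit : Bool := x == 2 * st.2 * st.2
  (st.1 ++ [hit], if hit then st.2 + 1 else st.2)

def twice_squares_alt (n : Int) : List Bool :=
  ((PySem.List.pyRange 0 n 1).foldl twiceStepB ([], 1)).1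

-- ===== PRECONDITION & SPEC =====
def Spec_twice_squares (n : Int) (out : List Bool) : Prop := out = twice_squares_alt n
instance (n : Int) (out : List Bool) : Decidable (Spec_twice_squares n out) := by unfold Spec_twice_squares; infer_instance

-- ===== CLAIM (what is proved, stated in full; the proofs are below) =====
def Claim_equal_twice_squares : Prop := ∀ (n : Int), Dom_twice_squares n → Spec_twice_squares n (twice_squares n)

-- ===== LEMMAS AND PROOFS =====

theorem twiceLoopA_length (n : Int) (l : List Bool) (i : Nat) :
    (twiceLoopA n l i).length = l.length := by
  fun_induction twiceLoopA n l i with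
  | case1 => rfl
  | case2 l i h ih => simpa using ih

-- characterisation of A's loop: entry j ends up true iff it was true already or j = 2k² for some k ≥ i
theorem twiceLoopA_char (n : Int) (l : List Bool) (i : Nat)
    (hi : 1 ≤ i) (hl : (l.length : Int) = n) (j : Nat) (hj : j < l.length) :
    ((twiceLoopA n l i).getD j false = true ↔
      (l.getD j false = true ∨ ∃ k : Nat, i ≤ k ∧ j = 2 * k * k)) := by
  fun_induction twiceLoopA n l i with
  | case1 l i h =>
    constructor
    · intro hget; exact Or.inl hget
    · rintro (hget | ⟨k, hik, hjk⟩)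
      · exact hget
      · exfalso
        have hmono : 2 * i * i ≤ 2 * k * k := by nlinarith
        have hjn : (j : Int) < n := by omega
        have : ((2 * k * k : Nat) : Int) ≥ n := by
          refine le_trans h ?_; exact_mod_cast hmono
        omega
  | case2 l i h ih =>
    rw [not_le] at h
    have hxlt : 2 * i * i < l.length := by omega
    have hl' : (((l.set (2 * i * i) true).length : Int)) = n := by
      simpa using hl
    have hj' : j < (l.set (2 * i * i) true).length := by simpa using hj
    rw [ih (by omega) hl' hj']
    by_cases hje : j = 2 * i * i
    · subst hje
      constructor
      · intro _; exact Or.inr ⟨i, le_refl i, rfl⟩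
      · intro _
        left
        rw [List.getD_eq_getElem _ _ hj', List.getElem_set_self]
    · constructor
      · rintro (hset | ⟨k, hik, hjk⟩)
        · left
          rw [List.getD_eq_getElem _ _ hj', List.getElem_set_ne (by omega)] at hset
          rw [List.getD_eq_getElem _ _ hj]
          exact hset
        · exact Or.inr ⟨k, by omega, hjk⟩
      · rintro (hget | ⟨k, hik, hjk⟩)
        · left
          rw [List.getD_eq_getElem _ _ hj', List.getElem_set_ne (by omega)]
          rw [List.getD_eq_getElem _ _ hj] at hget
          exact hget
        · refine Or.inr ⟨k, ?_, hjk⟩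
          rcases Nat.eq_or_lt_of_le hik with h1 | h1
          · exfalso; exact hje (by rw [hjk, ← h1])
          · exact h1
  
-- characterisation of B's fold, with the pointer invariant carried along
theorem twiceFoldB_char (n : Int) : ∀ (fuel : Nat) (a : Int) (acc : List Bool) (k : Int),
    (n - a).toNat = fuel → a = (acc.length : Int) → 1 ≤ k → a ≤ 2 * k * k →
    (∀ t : Int, 1 ≤ t → t < k → 2 * t * t < a) →
    (((PySem.List.pyRange a n 1).foldl twiceStepB (acc, k)).1.length = acc.length + (n - a).toNat ∧
     ∀ j : Nat, j < ((PySem.List.pyRange a n 1).foldl twiceStepB (acc, k)).1.length →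
       (((PySem.List.pyRange a n 1).foldl twiceStepB (acc, k)).1.getD j false = true ↔
         (acc.getD j false = true ∨ ((acc.length : Int) ≤ j ∧ ∃ t : Int, 1 ≤ t ∧ (j : Int) = 2 * t * t)))) := by
  intro fuel
  induction fuel with
  | zero =>
    intro a acc k hfuel ha _ _ _
    have hna : n ≤ a := by omega
    rw [PySem.List.pyRange_one_eq_nil hna]
    simp only [List.foldl_nil]
    refine ⟨by omega, ?_⟩
    intro j hj
    constructor
    · intro hget; exact Or.inl hget
    · rintro (hget | ⟨hle, _⟩)
      · exact hget
      · exfalso; omega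
  | succ fuel ih =>
    intro a acc k hfuel ha hk hk2 hklt
    have han : a < n := by omega
    rw [PySem.List.pyRange_one_cons han]
    simp only [List.foldl_cons]
    set hit : Bool := (a == 2 * k * k) with hhit
    have hstep : twiceStepB (acc, k) a = (acc ++ [hit], if hit then k + 1 else k) := rfl
    rw [hstep]
    set k' : Int := if hit then k + 1 else k with hk'
    have hacc' : (a + 1) = (((acc ++ [hit]).length : Int)) := by
      simp [List.length_append]; omega
    have hk'1 : 1 ≤ k' := by
      by_cases hb : hit = true <;> simp [hk', hb] <;> omega
    have hk'2 : a + 1 ≤ 2 * k' * k' := by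
      by_cases hb : hit = true
      · have hae : a = 2 * k * k := by simpa [hhit] using hb
        simp only [hk', hb, if_true]
        nlinarith
      · have hane : ¬ (a = 2 * k * k) := by simpa [hhit] using hb
        have hbf : hit = false := by simpa using hb
        simp only [hk', hbf, Bool.false_eq_true, if_false]
        omega
    have hklt' : ∀ t : Int, 1 ≤ t → t < k' → 2 * t * t < a + 1 := by
      intro t ht htk
      by_cases hb : hit = true
      · have hae : a = 2 * k * k := by simpa [hhit] using hb
        rw [hk'] at htk; simp only [hb, if_true] at htk
        rcases lt_or_eq_of_le (by omega : t ≤ k) with h1 | h1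
        · have := hklt t ht h1; omega
        · subst h1; omega
      · have hbf : hit = false := by simpa using hb
        rw [hk'] at htk; simp only [hbf, Bool.false_eq_true, if_false] at htk
        have := hklt t ht htk; omega
    obtain ⟨hlen, hchar⟩ := ih (a + 1) (acc ++ [hit]) k' (by omega) hacc' hk'1 hk'2 hklt'
    refine ⟨by simp [List.length_append] at hlen ⊢; omega, ?_⟩
    intro j hj
    rw [hchar j hj]
    have hlenacc : (acc ++ [hit]).length = acc.length + 1 := by simp
    rcases lt_trichotomy j acc.length with hlt | heq | hgt
    · rw [List.getD_append _ _ _ _ hlt]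
      constructor
      · rintro (hget | ⟨hle, _⟩)
        · exact Or.inl hget
        · exfalso; omega
      · rintro (hget | ⟨hle, _⟩)
        · exact Or.inl hget
        · exfalso; omega
    · subst heq
      have hgetacc : acc.getD acc.length false = false := List.getD_eq_default _ _ (le_refl _)
      have hgetapp : (acc ++ [hit]).getD acc.length false = hit := by
        rw [List.getD_eq_getElem _ _ (by simp)]
        simp
      rw [hgetapp, hgetacc]
      have hja : (acc.length : Int) = a := ha.symm
      constructor
      · rintro (hb | ⟨_, _⟩)
        · -- hit = true: a = 2 k², so k is the witness
          have hae : a = 2 * k * k := by simpa [hhit] using hb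
          exact Or.inr ⟨le_refl _, k, hk, by omega⟩
        · exact Or.inr ⟨le_refl _, by omega⟩
      · rintro (hb | ⟨_, t, ht1, ht2⟩)
        · exact absurd hb (by simp)
        · -- a = 2 t², t ≥ 1 forces t = k via the invariant
          have hat : a = 2 * t * t := by omega
          have htk : ¬ t < k := fun hc => by have := hklt t ht1 hc; omega
          have hkt : t ≤ k := by nlinarith
          have : t = k := le_antisymm hkt (not_lt.mp htk)
          subst this
          left
          simp [hhit, hat]
    · have h1 : acc.length ≤ j := by omega
      have h2 : (acc ++ [hit]).length ≤ j := by omega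
      rw [List.getD_eq_default _ _ h1, List.getD_eq_default _ _ h2]
      constructor
      · rintro (hget | ⟨_, hex⟩)
        · exact Or.inl hget
        · exact Or.inr ⟨by omega, hex⟩
      · rintro (hget | ⟨_, hex⟩)
        · exact Or.inl hget
        · exact Or.inr ⟨by omega, hex⟩

theorem twice_squares_alt_length (n : Int) : (twice_squares_alt n).length = n.toNat := by
  unfold twice_squares_alt
  obtain ⟨hlen, _⟩ := twiceFoldB_char n n.toNat 0 [] 1 (by omega) (by simp) (by omega)
    (by omega) (by intro t ht htk; omega)
  simpa using hlen

theorem twice_squares_alt_char (n : Int) (j : Nat) (hj : j < (twice_squares_alt n).length) :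
    ((twice_squares_alt n).getD j false = true ↔ ∃ t : Int, 1 ≤ t ∧ (j : Int) = 2 * t * t) := by
  unfold twice_squares_alt at hj ⊢
  obtain ⟨_, hchar⟩ := twiceFoldB_char n n.toNat 0 [] 1 (by omega) (by simp) (by omega)
    (by omega) (by intro t ht htk; omega)
  rw [hchar j hj]
  simp

theorem twice_squares_eq (n : Int) : twice_squares n = twice_squares_alt n := by
  have hAlen : (twice_squares n).length = n.toNat := by
    unfold twice_squares
    rw [twiceLoopA_length]; simp
  have hBlen := twice_squares_alt_length n
  apply List.ext_getElem (by omega)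
  intro j hjA hjB
  have hjn : j < n.toNat := by omega
  have hn0 : 0 ≤ n := by omega
  have hrep : (j : Nat) < (List.replicate n.toNat (false : Bool)).length := by simpa using hjn
  have hA : ((twice_squares n).getD j false = true ↔ ∃ k : Nat, 1 ≤ k ∧ j = 2 * k * k) := by
    unfold twice_squares
    rw [twiceLoopA_char n _ 1 (le_refl 1) (by simp; omega) j hrep]
    constructor
    · rintro (hget | hex)
      · exfalso
        rw [List.getD_eq_getElem _ _ hrep] at hget
        simp at hget
      · exact hex
    · intro hex; exact Or.inr hex
  have hB := twice_squares_alt_char n j (by omega)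
  have hiff : ((twice_squares n).getD j false = true ↔ (twice_squares_alt n).getD j false = true) := by
    rw [hA, hB]
    constructor
    · rintro ⟨k, hk, hjk⟩
      exact ⟨(k : Int), by exact_mod_cast hk, by exact_mod_cast hjk⟩
    · rintro ⟨t, ht, hjt⟩
      refine ⟨t.toNat, by omega, ?_⟩
      have htn : ((t.toNat : Int)) = t := by omega
      have : (j : Int) = 2 * (t.toNat : Int) * (t.toNat : Int) := by rw [htn]; exact hjt
      exact_mod_cast this
  rw [List.getD_eq_getElem _ _ hjA, List.getD_eq_getElem _ _ hjB] at hiff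
  exact Bool.eq_iff_iff.mpr hiff

-- ===== VERDICT (by name: the statement is the Claim_ definition above) =====
theorem twice_squares_spec : Claim_equal_twice_squares := by
  intro n _
  unfold Spec_twice_squares
  exact twice_squares_eq n
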